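-- pv_equiv track=rewrite | github.com/AnimeWeeb9000/projects | sum squares fast.py | list_nums
-- ===== SOURCE A (Python) =====
-- import math
--
-- def list_nums(n: int):
--     n = int(n)
--
--     root = math.isqrt(n)
--     if root * root == n:               # perfect-square fast path
--         return [root, 0, 0, 0]
--
--     def invalid_remainder(r: int):
--         # Legendre: if the remainder is 7 then a cannot make 3 square sum
--         while r % 4 == 0:
--             r //= 4
--         return r % 8 == 7
--
--     limit = root
--     squares = [i * i for i in range(limit + 1)]
--
--     def two_square_decomp(s: int):
--         i, j = 0, min(limit, math.isqrt(s))
--         while i <= j: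
--             t = squares[i] + squares[j]
--             if t == s:
--                 return i, j
--             if t < s:
--                 i += 1
--             else:
--                 j -= 1
--         return None
--
--     for a in range(limit, -1, -1):
--         r = n - squares[a]
--         if invalid_remainder(r):
--             continue
--
--         # optional pruning: enforce b <= a to cut symmetric duplicates
--         bmax = min(a, math.isqrt(r))
--         for b in range(bmax, -1, -1):
--             s = r - b * b
--
--             # quick necessary residue checks for two squares
--             if s % 4 == 3:
--                 continue
--
--             cd = two_square_decomp(s)
--             if cd is not None:
--                 c, d = cd
--                 return [a, b, c, d]
--
--     return None  # theoretically unreachable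
-- ===== SOURCE B (Python) =====
-- import math
--
-- def list_nums(n: int):
--     n = int(n)
--
--     root = math.isqrt(n)
--     if root * root == n:               # perfect-square fast path
--         return [root, 0, 0, 0]
--
--     def not_three_squares(r: int):
--         # Legendre: r = 4^k * (8m + 7) is not a sum of three squares
--         while r % 4 == 0:
--             r //= 4
--         return r % 8 == 7
--
--     for a in range(root, -1, -1):
--         r = n - a * a
--         if not_three_squares(r):
--             continue
--
--         for b in range(min(a, math.isqrt(r)), -1, -1):
--             s = r - b * b
--             # smallest c with c*c + d*d == s and c <= d, found by a direct
--             # perfect-square test on s - c*c (no table, no second pointer)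
--             c = 0
--             while 2 * c * c <= s:
--                 rem = s - c * c
--                 d = math.isqrt(rem)
--                 if d * d == rem:
--                     return [a, b, c, d]
--                 c += 1
--
--     return None
-- ===== Notes on version B (the rewrite author's own statement) =====
-- stated objective: simpler
-- what changed: The precomputed squares table, the two-pointer two_square_decomp helper and the residue-class pruning of the inner sum are all removed; instead an ascending loop over the smaller square with a direct isqrt perfect-square test on the remainder finds the same smallest-first pair.
import Mathlib
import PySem

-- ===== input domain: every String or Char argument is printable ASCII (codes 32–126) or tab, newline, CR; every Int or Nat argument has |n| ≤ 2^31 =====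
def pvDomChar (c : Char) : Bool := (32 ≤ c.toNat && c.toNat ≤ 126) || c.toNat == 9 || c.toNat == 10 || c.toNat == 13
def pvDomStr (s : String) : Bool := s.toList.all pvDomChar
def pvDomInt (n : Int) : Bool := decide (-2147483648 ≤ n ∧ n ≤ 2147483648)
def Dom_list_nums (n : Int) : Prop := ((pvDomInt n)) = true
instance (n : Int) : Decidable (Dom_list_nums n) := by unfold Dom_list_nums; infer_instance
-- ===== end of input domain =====

-- B replaces A's squares table + two-pointer inner search (and its residue pruning) by a direct
-- ascending-c isqrt perfect-square test; objective: simpler.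

-- math.isqrt for 0 ≤ x (Nat.sqrt is the floor square root; negative arguments are outside Pre_)
def isqrtI (x : Int) : Int := (Int.toNat x).sqrt

-- ===== PORT A =====

-- while r % 4 == 0: r //= 4; return r % 8 == 7   (fuel r.toNat+1 at the call site; at runtime
-- r ≥ 1 there, so the loop terminates well within that fuel and the fuel-exhaustion value is never used)
def invalidRemAux : Nat → Int → Bool
  | 0, r => PySem.Int.mod r 8 == 7
  | f+1, r =>
    if PySem.Int.mod r 4 == 0 then invalidRemAux f (PySem.Int.floordiv r 4)
    else PySem.Int.mod r 8 == 7

-- the while i <= j two-pointer loop of two_square_decomp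
def twoPtrAux (squares : List Int) (s : Int) : Nat → Int → Int → Option (Int × Int)
  | 0, _, _ => none
  | f+1, i, j =>
    if i ≤ j then
      let t := PySem.List.pyGetD squares i 0 + PySem.List.pyGetD squares j 0
      if t = s then some (i, j)
      else if t < s then twoPtrAux squares s f (i+1) j
      else twoPtrAux squares s f i (j-1)
    else none

def twoSquareDecomp (limit : Int) (squares : List Int) (s : Int) : Option (Int × Int) :=
  let j := min limit (isqrtI s)
  twoPtrAux squares s (j + 2).toNat 0 j

-- for b in range(bmax, -1, -1): …
def bLoopA (limit : Int) (squares : List Int) (a r : Int) : List Int → Option (List Int)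
  | [] => none
  | b :: bs =>
    let s := r - b * b
    if PySem.Int.mod s 4 == 3 then bLoopA limit squares a r bs
    else
      match twoSquareDecomp limit squares s with
      | some (c, d) => some [a, b, c, d]
      | none => bLoopA limit squares a r bs

-- for a in range(limit, -1, -1): …
def aLoopA (n limit : Int) (squares : List Int) : List Int → Option (List Int)
  | [] => none
  | a :: as_ =>
    let r := n - PySem.List.pyGetD squares a 0
    if invalidRemAux (r.toNat + 1) r then aLoopA n limit squares as_
    else
      match bLoopA limit squares a r (PySem.List.pyRange (min a (isqrtI r)) (-1) (-1)) with
      | some out => some out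
      | none => aLoopA n limit squares as_

def list_nums (n : Int) : Option (List Int) :=
  let root := isqrtI n
  if root * root = n then some [root, 0, 0, 0]
  else
    let limit := root
    let squares := (PySem.List.pyRange 0 (limit + 1) 1).map (fun i => i * i)
    aLoopA n limit squares (PySem.List.pyRange limit (-1) (-1))

-- ===== PORT B =====

-- B's not_three_squares: same while loop as A's helper (same fuel convention)
def notThreeSquaresAux : Nat → Int → Bool
  | 0, r => PySem.Int.mod r 8 == 7
  | f+1, r =>
    if PySem.Int.mod r 4 == 0 then notThreeSquaresAux f (PySem.Int.floordiv r 4)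
    else PySem.Int.mod r 8 == 7

-- while 2*c*c <= s: test s - c*c for squareness (fuel (isqrtI s + 2).toNat suffices: c ≤ isqrtI s)
def cLoopB (a b s : Int) : Nat → Int → Option (List Int)
  | 0, _ => none
  | f+1, c =>
    if 2 * c * c ≤ s then
      let rem := s - c * c
      let d := isqrtI rem
      if d * d = rem then some [a, b, c, d] else cLoopB a b s f (c + 1)
    else none

def bLoopB (a r : Int) : List Int → Option (List Int)
  | [] => none
  | b :: bs =>
    let s := r - b * b
    match cLoopB a b s (isqrtI s + 2).toNat 0 with
    | some out => some out
    | none => bLoopB a r bs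

def aLoopB (n : Int) : List Int → Option (List Int)
  | [] => none
  | a :: as_ =>
    let r := n - a * a
    if notThreeSquaresAux (r.toNat + 1) r then aLoopB n as_
    else
      match bLoopB a r (PySem.List.pyRange (min a (isqrtI r)) (-1) (-1)) with
      | some out => some out
      | none => aLoopB n as_

def list_nums_alt (n : Int) : Option (List Int) :=
  let root := isqrtI n
  if root * root = n then some [root, 0, 0, 0]
  else aLoopB n (PySem.List.pyRange root (-1) (-1))

-- ===== PRECONDITION & SPEC =====
-- math.isqrt raises ValueError on negative arguments, so A (and B) raise exactly on negative n.
def Pre_list_nums (n : Int) : Prop := 0 ≤ n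
instance (n : Int) : Decidable (Pre_list_nums n) := by unfold Pre_list_nums; infer_instance
def pvWitness_list_nums : Int := 7

def Spec_list_nums (n : Int) (out : Option (List Int)) : Prop := out = list_nums_alt n
instance (n : Int) (out : Option (List Int)) : Decidable (Spec_list_nums n out) := by unfold Spec_list_nums; infer_instance

-- ===== CLAIM (what is proved, stated in full; the proofs are below) =====
def Claim_equal_list_nums : Prop := ∀ (n : Int), Dom_list_nums n → Pre_list_nums n → Spec_list_nums n (list_nums n)

-- ===== LEMMAS AND PROOFS =====

-- facts about isqrtI (= math.isqrt on nonnegative arguments)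
theorem isqrtI_nonneg (x : Int) : 0 ≤ isqrtI x := Int.natCast_nonneg _

theorem isqrtI_sq_le (x : Int) (hx : 0 ≤ x) : isqrtI x * isqrtI x ≤ x := by
  have h := Nat.sqrt_le' x.toNat
  rw [pow_two] at h
  have : ((Nat.sqrt x.toNat * Nat.sqrt x.toNat : Nat) : Int) ≤ (x.toNat : Int) := by exact_mod_cast h
  push_cast at this
  unfold isqrtI
  omega

theorem le_isqrtI {c x : Int} (hc : 0 ≤ c) (h : c * c ≤ x) : c ≤ isqrtI x := by
  have hx : 0 ≤ x := le_trans (mul_self_nonneg c) h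
  have hn : c.toNat ^ 2 ≤ x.toNat := by
    rw [pow_two]
    have : (↑(c.toNat * c.toNat) : Int) ≤ (x.toNat : Int) := by
      push_cast
      rw [Int.toNat_of_nonneg hc, Int.toNat_of_nonneg hx]
      exact h
    exact_mod_cast this
  have := Nat.le_sqrt'.mpr hn
  unfold isqrtI
  omega

theorem isqrtI_sq_exact (j : Int) (hj : 0 ≤ j) : isqrtI (j * j) = j := by
  unfold isqrtI
  rw [Int.toNat_mul hj hj, ← pow_two, Nat.sqrt_eq', Int.toNat_of_nonneg hj]

-- no sum of two squares lies in the residue class the pruning test rejects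
theorem two_sq_not_mod4 (c d s : Int) (h : c * c + d * d = s) : PySem.Int.mod s 4 ≠ 3 := by
  rw [PySem.Int.mod_eq_emod_of_pos (by norm_num)]
  rcases Int.even_or_odd c with ⟨p, hp⟩ | ⟨p, hp⟩ <;>
    rcases Int.even_or_odd d with ⟨q, hq⟩ | ⟨q, hq⟩ <;> subst hp <;> subst hq <;>
    [ (have e : s = 4 * (p * p + q * q) := by rw [← h]; ring);
      (have e : s = 4 * (p * p + q * q + q) + 1 := by rw [← h]; ring);
      (have e : s = 4 * (p * p + p + q * q) + 1 := by rw [← h]; ring);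
      (have e : s = 4 * (p * p + p + q * q + q) + 2 := by rw [← h]; ring)] <;>
    omega

-- the two identical while-loop helpers agree
theorem invalidRem_eq_notThree (f : Nat) (r : Int) : invalidRemAux f r = notThreeSquaresAux f r := by
  induction f generalizing r with
  | zero => rfl
  | succ f ih =>
    simp only [invalidRemAux, notThreeSquaresAux]
    split <;> simp [ih]

-- B's c-loop returns none when s has no two-square representation from c upward
theorem cLoopB_none (a b s : Int) (f : Nat) (c : Int) (hc : 0 ≤ c)
    (h : ∀ c' d : Int, c ≤ c' → c' ≤ d → c' * c' + d * d = s → False) :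
    cLoopB a b s f c = none := by
  induction f generalizing c with
  | zero => rfl
  | succ f ih =>
    simp only [cLoopB]
    split
    · rename_i hg
      have hrem : c * c ≤ s - c * c := by nlinarith
      have hd : c ≤ isqrtI (s - c * c) := le_isqrtI hc hrem
      have hne : ¬ (isqrtI (s - c * c) * isqrtI (s - c * c) = s - c * c) := by
        intro he
        exact h c (isqrtI (s - c * c)) le_rfl hd (by omega)
      simp only [hne, if_false]
      exact ih (c + 1) (by omega) (fun c' d h1 h2 h3 => h c' d (by omega) h2 h3)
    · rfl

-- MAIN: the two-pointer from (i, j) computes the same as B's ascending c-loop from c = i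
theorem twoPtr_eq_cLoop (limit : Int) (squares : List Int) (a b s : Int)
    (hsq : ∀ k : Int, 0 ≤ k → k ≤ limit → PySem.List.pyGetD squares k 0 = k * k)
    (hsl : isqrtI s ≤ limit) (hs : 0 ≤ s) :
    ∀ (f : Nat) (i j : Int) (f' : Nat), 0 ≤ i → j ≤ isqrtI s →
      (∀ d : Int, j < d → d ≤ isqrtI s → s < i * i + d * d) →
      (j - i + 1).toNat < f → (isqrtI s + 1 - i).toNat < f' →
      Option.map (fun cd : Int × Int => [a, b, cd.1, cd.2]) (twoPtrAux squares s f i j)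
        = cLoopB a b s f' i := by
  intro f
  induction f with
  | zero => intro i j f' _ _ _ hf _; omega
  | succ f ih =>
    intro i j f' hi hj hinv hf hf'
    by_cases hij : i ≤ j
    · have hj0 : 0 ≤ j := le_trans hi hij
      have hii : PySem.List.pyGetD squares i 0 = i * i := hsq i hi (by omega)
      have hjj : PySem.List.pyGetD squares j 0 = j * j := hsq j hj0 (by omega)
      have hiis : i * i ≤ j * j := mul_self_le_mul_self hi hij
      have hjs : j * j ≤ s := le_trans (mul_self_le_mul_self hj0 hj) (isqrtI_sq_le s hs)
      simp only [twoPtrAux, hii, hjj, if_pos hij]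
      obtain ⟨k, rfl⟩ : ∃ k, f' = k + 1 := ⟨f' - 1, by omega⟩
      by_cases heq : i * i + j * j = s
      · -- hit: two-pointer returns (i, j); c-loop accepts c = i with d = j
        simp only [if_pos heq, Option.map_some, cLoopB]
        have hg : 2 * i * i ≤ s := by nlinarith
        have hrem : s - i * i = j * j := by omega
        rw [if_pos hg, hrem, isqrtI_sq_exact j hj0, if_pos rfl]
      · rw [if_neg heq]
        by_cases hlt : i * i + j * j < s
        · -- advance i: the c-loop also rejects c = i
          rw [if_pos hlt]
          have hg : 2 * i * i ≤ s := by nlinarith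
          have hdni : ¬ (isqrtI (s - i * i) * isqrtI (s - i * i) = s - i * i) := by
            intro he
            set d := isqrtI (s - i * i) with hdef
            have hii0 : 0 ≤ i * i := mul_self_nonneg i
            have hd0 : 0 ≤ d := isqrtI_nonneg _
            have hds : d ≤ isqrtI s := le_isqrtI hd0 (by omega)
            have hdj : j < d := by
              by_cases hle : d ≤ j
              · have := mul_self_le_mul_self hd0 hle
                omega
              · omega
            have := hinv d hdj hds
            omega
          have hstep : cLoopB a b s (k + 1) i = cLoopB a b s k (i + 1) := by
            simp only [cLoopB, if_pos hg, hdni, if_false]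
          rw [hstep]
          have hisq : i ≤ isqrtI s := le_trans hij hj
          exact ih (i + 1) j k (by omega) hj
            (fun d hd1 hd2 => by have := hinv d hd1 hd2; nlinarith)
            (by omega) (by omega)
        · -- overshoot: retreat j; the c-loop side is untouched
          rw [if_neg hlt]
          have hgt : s < i * i + j * j := by omega
          exact ih i (j - 1) (k + 1) hi (by omega)
            (fun d hd1 hd2 => by
              rcases lt_or_eq_of_le (show j ≤ d by omega) with h' | h'
              · exact hinv d h' hd2
              · rw [← h']; exact hgt)
            (by omega) (by omega)
    · -- i > j: both sides are none
      simp only [twoPtrAux, if_neg hij, Option.map_none]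
      refine (cLoopB_none a b s f' i hi ?_).symm
      intro c' d h1 h2 h3
      have hc' : 0 ≤ c' := le_trans hi h1
      have hd0 : 0 ≤ d := le_trans hc' h2
      have hds : d ≤ isqrtI s := le_isqrtI hd0 (by nlinarith)
      have hdj : j < d := by omega
      have := hinv d hdj hds
      nlinarith [mul_self_le_mul_self hi h1]

-- the two b-loops agree (A's residue pruning skips only values B's c-loop rejects anyway)
theorem bLoop_eq (n limit : Int) (squares : List Int) (a r : Int)
    (hsq : ∀ k : Int, 0 ≤ k → k ≤ limit → PySem.List.pyGetD squares k 0 = k * k)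
    (_hr0 : 0 ≤ r) (hrn : r ≤ n) (hlim : limit = isqrtI n) :
    ∀ bs : List Int, (∀ b ∈ bs, 0 ≤ b ∧ b * b ≤ r) →
      bLoopA limit squares a r bs = bLoopB a r bs := by
  intro bs
  induction bs with
  | nil => intro _; rfl
  | cons b bs ih =>
    intro hmem
    obtain ⟨hb0, hbr⟩ := hmem b (List.mem_cons_self ..)
    have ihm : ∀ b' ∈ bs, 0 ≤ b' ∧ b' * b' ≤ r := fun b' h => hmem b' (List.mem_cons_of_mem _ h)
    have hs0 : 0 ≤ r - b * b := by omega
    have hsn : r - b * b ≤ n := by nlinarith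
    have hsl : isqrtI (r - b * b) ≤ limit := by
      rw [hlim]
      exact le_isqrtI (isqrtI_nonneg _) (le_trans (isqrtI_sq_le _ hs0) (by omega))
    simp only [bLoopA, bLoopB]
    by_cases hmod : PySem.Int.mod (r - b * b) 4 = 3
    · -- A skips; B's c-loop finds nothing there
      have hnone : cLoopB a b (r - b * b) (isqrtI (r - b * b) + 2).toNat 0 = none :=
        cLoopB_none _ _ _ _ 0 le_rfl
          (fun c' d _ _ h3 => two_sq_not_mod4 c' d _ h3 hmod)
      simp only [hmod, hnone]
      simpa using ih ihm
    · have htp := twoPtr_eq_cLoop limit squares a b (r - b * b) hsq hsl hs0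
        (isqrtI (r - b * b) + 2).toNat 0 (isqrtI (r - b * b)) (isqrtI (r - b * b) + 2).toNat
        le_rfl le_rfl (fun d hd1 hd2 => absurd (lt_of_lt_of_le hd1 hd2) (lt_irrefl _))
        (by have := isqrtI_nonneg (r - b * b); omega)
        (by have := isqrtI_nonneg (r - b * b); omega)
      simp only [twoSquareDecomp, min_eq_right hsl] at *
      have hmodf : (PySem.Int.mod (r - b * b) 4 == 3) = false := by
        simp only [beq_eq_false_iff_ne, ne_eq]
        exact hmod
      rw [hmodf]
      simp only [Bool.false_eq_true, if_false]
      cases htw : twoPtrAux squares (r - b * b) (isqrtI (r - b * b) + 2).toNat 0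
          (isqrtI (r - b * b)) with
      | some cd =>
        rw [htw] at htp
        simp only [Option.map_some] at htp
        rw [← htp]
      | none =>
        rw [htw] at htp
        simp only [Option.map_none] at htp
        rw [← htp]
        exact ih ihm

-- the two a-loops agree
theorem aLoop_eq (n limit : Int) (squares : List Int)
    (hsq : ∀ k : Int, 0 ≤ k → k ≤ limit → PySem.List.pyGetD squares k 0 = k * k)
    (hlim : limit = isqrtI n) (hn : 0 ≤ n) :
    ∀ as_ : List Int, (∀ a ∈ as_, 0 ≤ a ∧ a ≤ limit) →
      aLoopA n limit squares as_ = aLoopB n as_ := by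
  intro as_
  induction as_ with
  | nil => intro _; rfl
  | cons a as_ ih =>
    intro hmem
    obtain ⟨ha0, hal⟩ := hmem a (List.mem_cons_self ..)
    have ihm : ∀ a' ∈ as_, 0 ≤ a' ∧ a' ≤ limit := fun a' h => hmem a' (List.mem_cons_of_mem _ h)
    have haa : a * a ≤ n := by
      rw [hlim] at hal
      exact le_trans (mul_self_le_mul_self ha0 hal) (isqrtI_sq_le n hn)
    simp only [aLoopA, aLoopB, hsq a ha0 hal, invalidRem_eq_notThree]
    by_cases hinv : notThreeSquaresAux ((n - a * a).toNat + 1) (n - a * a) = true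
    · simp only [hinv, if_true]
      exact ih ihm
    · simp only [hinv]
      have hbl := bLoop_eq n limit squares a (n - a * a) hsq (by omega)
        (by have := mul_self_nonneg a; omega) hlim
        (PySem.List.pyRange (min a (isqrtI (n - a * a))) (-1) (-1))
        (fun b hb => by
          rw [PySem.List.mem_pyRange_neg_one] at hb
          refine ⟨by omega, ?_⟩
          have hb0 : 0 ≤ b := by omega
          have hbi : b ≤ isqrtI (n - a * a) := le_trans hb.2 (min_le_right ..)
          exact le_trans (mul_self_le_mul_self hb0 hbi) (isqrtI_sq_le _ (by omega)))
      rw [hbl]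
      simp only [Bool.false_eq_true, if_false]
      cases bLoopB a (n - a * a) (PySem.List.pyRange (min a (isqrtI (n - a * a))) (-1) (-1)) with
      | some out => rfl
      | none => exact ih ihm

theorem list_nums_spec : Claim_equal_list_nums := by
  intro n _ hpre
  unfold Spec_list_nums list_nums list_nums_alt
  by_cases hps : isqrtI n * isqrtI n = n
  · simp only [hps, if_true]
  · simp only [hps, if_false]
    refine aLoop_eq n (isqrtI n) _ ?_ rfl hpre _ ?_
    · intro k hk1 hk2
      exact PySem.List.pyGetD_map_pyRange_of_nonneg _ _ _ _ hk1 (by omega)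
    · intro a ha
      rw [PySem.List.mem_pyRange_neg_one] at ha
      omega
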